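-- pv_equiv track=rewrite | github.com/ThatguywithHL2/my-first-python-games | Heroquest10.py | sign_rank
-- ===== SOURCE A (Python) =====
-- def sign_rank(level,hx, hy, hz):
--     rank = -1
--     for y, line in enumerate(level[hz]):
--         for x, char in enumerate(line):
--             if char == "]":
--                 rank += 1
--             if x == hx and y == hy:
--                 return rank
--     return None
-- ===== SOURCE B (Python) =====
-- def sign_rank(level, hx, hy, hz):
--     lines = level[hz]
--     if not (0 <= hy < len(lines) and 0 <= hx < len(lines[hy])):
--         return None
--     rank = sum(line.count(']') for line in lines[:hy])
--     rank += lines[hy][:hx + 1].count(']')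
--     return rank - 1
-- ===== Notes on version B (the rewrite author's own statement) =====
-- stated objective: simpler
-- what changed: Replaces the char-by-char scan with early return by a reachability guard plus prefix counts: sum of str.count(']') over the rows before hy and an inclusive slice count in row hy, minus 1.
import Mathlib
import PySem

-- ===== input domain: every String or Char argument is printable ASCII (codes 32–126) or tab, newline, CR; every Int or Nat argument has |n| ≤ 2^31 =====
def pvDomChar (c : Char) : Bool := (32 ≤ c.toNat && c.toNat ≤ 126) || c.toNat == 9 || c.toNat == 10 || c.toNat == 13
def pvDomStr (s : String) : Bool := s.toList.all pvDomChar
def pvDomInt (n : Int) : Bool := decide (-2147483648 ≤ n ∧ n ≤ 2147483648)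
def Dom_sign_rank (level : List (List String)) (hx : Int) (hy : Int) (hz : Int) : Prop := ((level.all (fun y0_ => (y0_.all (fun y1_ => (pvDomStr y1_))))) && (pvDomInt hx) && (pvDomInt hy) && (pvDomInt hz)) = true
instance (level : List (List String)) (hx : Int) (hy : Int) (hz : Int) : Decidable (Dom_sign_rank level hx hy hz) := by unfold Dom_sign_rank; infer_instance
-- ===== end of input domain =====

-- B replaces A's char-by-char scan (with early return) by a reachability guard plus
-- prefix ']' counts (simpler decomposition; same asymptotic cost).


-- ===== PORT A =====
-- inner loop over the chars of one line: .inl r = early return r, .inr rank = row finished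
def signRankInner (chars : List Char) (x : Int) (hx hy y rank : Int) : Sum Int Int :=
  match chars with
  | [] => .inr rank
  | c :: rest =>
    let rank' := if c = ']' then rank + 1 else rank
    if x = hx ∧ y = hy then .inl rank' else signRankInner rest (x + 1) hx hy y rank'

-- outer loop over the lines of level[hz]
def signRankOuter (rows : List String) (y : Int) (hx hy rank : Int) : Option Int :=
  match rows with
  | [] => none
  | line :: rest =>
    match signRankInner line.toList 0 hx hy y rank with
    | .inl r => some r
    | .inr rank' => signRankOuter rest (y + 1) hx hy rank'

def sign_rank (level : List (List String)) (hx : Int) (hy : Int) (hz : Int) : Option Int :=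
  match PySem.List.pyGet? level hz with
  | none => none          -- IndexError on level[hz]: excluded by Pre_
  | some lines => signRankOuter lines 0 hx hy (-1)

-- ===== PORT B =====
def sign_rank_alt (level : List (List String)) (hx : Int) (hy : Int) (hz : Int) : Option Int :=
  match PySem.List.pyGet? level hz with
  | none => none          -- IndexError on level[hz]: excluded by Pre_
  | some lines =>
    if 0 ≤ hy ∧ hy < (lines.length : Int) then
      let row := PySem.List.pyGetD lines hy ""
      if 0 ≤ hx ∧ hx < (PySem.Str.len row : Int) then
        let rank : Int :=
          ((PySem.List.slice lines none (some hy)).map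
            (fun line => (PySem.Str.count line "]" : Int))).sum
        some (rank + (PySem.Str.count (PySem.Str.slice row none (some (hx + 1))) "]" : Int) - 1)
      else none
    else none

-- ===== PRECONDITION & SPEC =====
-- Pre_ excludes exactly the inputs where the Python A raises IndexError on level[hz].
def Pre_sign_rank (level : List (List String)) (hx : Int) (hy : Int) (hz : Int) : Prop :=
  PySem.Raise.InRange level.length hz
instance (level : List (List String)) (hx : Int) (hy : Int) (hz : Int) : Decidable (Pre_sign_rank level hx hy hz) := by unfold Pre_sign_rank; infer_instance
def pvWitness_sign_rank : List (List String) × Int × Int × Int := ([["a]", "]]"]], 1, 1, 0)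

def Spec_sign_rank (level : List (List String)) (hx : Int) (hy : Int) (hz : Int) (out : Option Int) : Prop := out = sign_rank_alt level hx hy hz
instance (level : List (List String)) (hx : Int) (hy : Int) (hz : Int) (out : Option Int) : Decidable (Spec_sign_rank level hx hy hz out) := by unfold Spec_sign_rank; infer_instance

-- ===== CLAIM (what is proved, stated in full; the proofs are below) =====
def Claim_equal_sign_rank : Prop := ∀ (level : List (List String)) (hx : Int) (hy : Int) (hz : Int), Dom_sign_rank level hx hy hz → Pre_sign_rank level hx hy hz → Spec_sign_rank level hx hy hz (sign_rank level hx hy hz)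

-- ===== LEMMAS AND PROOFS =====

-- PySem.Chars.count with a single-char needle is List.count
theorem charsCountGo_singleton (c : Char) (s : List Char) (fuel : Nat) (acc : Nat)
    (h : s.length ≤ fuel) : PySem.Chars.count.go [c] fuel s acc = acc + s.count c := by
  induction s generalizing fuel acc with
  | nil => cases fuel <;> simp [PySem.Chars.count.go]
  | cons a t ih =>
    cases fuel with
    | zero => simp at h
    | succ n =>
      rw [PySem.Chars.count.go]
      by_cases hc : a = c
      · subst hc
        have hpre : ([a].isPrefixOf (a :: t)) = true := by simp [List.isPrefixOf]
        rw [hpre]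
        have hd : List.drop ([a].length) (a :: t) = t := rfl
        simp only [if_true]
        rw [hd, ih n (acc + 1) (by simp at h; omega)]
        simp [List.count_cons]
        omega
      · have hpre : ([c].isPrefixOf (a :: t)) = false := by
          simp [List.isPrefixOf]; exact fun h' => absurd h' (by simpa [eq_comm] using hc)
        rw [hpre]
        simp only [Bool.false_eq_true, if_false]
        rw [ih n acc (by simp at h; omega)]
        simp [List.count_cons, hc]

theorem charsCount_singleton (c : Char) (s : List Char) :
    PySem.Chars.count s [c] = s.count c := by
  rw [PySem.Chars.count]
  rw [if_neg (by simp)]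
  simpa using charsCountGo_singleton c s s.length 0 (le_refl _)

theorem strCount_bracket (s : String) :
    PySem.Str.count s "]" = s.toList.count ']' := by
  have : PySem.Str.count s "]" = PySem.Chars.count s.toList [']'] := by
    simp [PySem.Str.count]
  rw [this, charsCount_singleton]

-- the inner loop never fires its return when y ≠ hy (or hx is out of this row's reach)
theorem signRankInner_noRet (chars : List Char) (x hx hy y rank : Int)
    (h : ¬ (y = hy ∧ x ≤ hx ∧ hx < x + chars.length)) :
    signRankInner chars x hx hy y rank = .inr (rank + chars.count ']') := by
  induction chars generalizing x rank with
  | nil => simp [signRankInner]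
  | cons c t ih =>
    have hlen : ((c :: t).length : Int) = (t.length : Int) + 1 := by simp
    simp only [signRankInner]
    have hx' : ¬ (x = hx ∧ y = hy) := by
      rintro ⟨rfl, rfl⟩
      exact h ⟨rfl, le_refl _, by omega⟩
    rw [if_neg hx', ih (x + 1) _ ?_]
    · by_cases hc : c = ']' <;> simp [hc, List.count_cons] <;> ring
    · rintro ⟨rfl, h1, h2⟩
      by_cases hxe : x = hx
      · exact hx' ⟨hxe, rfl⟩
      · exact h ⟨rfl, by omega, by omega⟩

-- the inner loop returns the inclusive prefix count when the target cell is in this row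
theorem signRankInner_ret (chars : List Char) (x hx rank : Int) (hy : Int)
    (h1 : x ≤ hx) (h2 : hx < x + chars.length) :
    signRankInner chars x hx hy hy rank =
      .inl (rank + (chars.take (hx - x + 1).toNat).count ']') := by
  induction chars generalizing x rank with
  | nil => simp at h2; omega
  | cons c t ih =>
    simp only [signRankInner]
    by_cases hx0 : x = hx
    · subst hx0
      rw [if_pos (by exact ⟨rfl, trivial⟩)]
      have : (x - x + 1).toNat = 1 := by omega
      by_cases hc : c = ']' <;> simp [this, hc, List.count_cons]
    · rw [if_neg (by rintro ⟨h, -⟩; exact hx0 h)]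
      have hle : x + 1 ≤ hx := by omega
      rw [ih (x + 1) _ hle (by simp at h2 ⊢; push_cast at h2 ⊢; omega)]
      have ht : (hx - x + 1).toNat = (hx - (x + 1) + 1).toNat + 1 := by omega
      rw [ht]
      by_cases hc : c = ']' <;>
        simp [hc, List.count_cons, List.take_succ_cons] <;> ring

-- characterisation of the outer loop
theorem signRankOuter_spec (rows : List String) (y hx hy rank : Int) :
    signRankOuter rows y hx hy rank =
      if h : 0 ≤ hy - y ∧ hy - y < rows.length ∧ 0 ≤ hx ∧
              hx < ((rows.getD (hy - y).toNat "").toList.length : Int) then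
        some (rank
          + ((rows.take (hy - y).toNat).map (fun l => (l.toList.count ']' : Int))).sum
          + ((rows.getD (hy - y).toNat "").toList.take (hx + 1).toNat).count ']')
      else none := by
  induction rows generalizing y rank with
  | nil => simp [signRankOuter]
  | cons r rest ih =>
    simp only [signRankOuter]
    by_cases hyy : y = hy
    · subst hyy
      have h0 : (y - y).toNat = 0 := by omega
      by_cases hin : 0 ≤ hx ∧ hx < (r.toList.length : Int)
      · rw [signRankInner_ret r.toList 0 hx rank y (by omega) (by simpa using hin.2)]
        dsimp only
        rw [dif_pos ⟨by omega, by simp only [List.length_cons]; push_cast; omega, hin.1,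
                     by simpa [h0] using hin.2⟩]
        simp only [h0, List.getD_cons_zero, List.take_zero, List.map_nil, List.sum_nil]
        have hx1 : hx - 0 + 1 = hx + 1 := by ring
        rw [hx1]
        congr 1
        push_cast
        ring
      · rw [signRankInner_noRet r.toList 0 hx y y rank (by rintro ⟨-, a, b⟩; exact hin ⟨a, by simpa using b⟩)]
        dsimp only
        rw [dif_neg ?hneg, ih (y + 1) _, dif_neg (by rintro ⟨a, -⟩; omega)]
        case hneg =>
          rintro ⟨-, -, a, b⟩
          exact hin ⟨a, by simpa [h0] using b⟩
    · rw [signRankInner_noRet r.toList 0 hx hy y rank (by rintro ⟨h, -⟩; exact hyy h)]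
      dsimp only
      rw [ih (y + 1) _]
      by_cases hpos : 0 ≤ hy - y
      · have hne : hy - y ≠ 0 := by omega
        have hts : (hy - y).toNat = (hy - (y + 1)).toNat + 1 := by omega
        by_cases hcond : 0 ≤ hy - (y+1) ∧ hy - (y+1) < (rest.length : Int) ∧ 0 ≤ hx ∧
            hx < ((rest.getD (hy - (y+1)).toNat "").toList.length : Int)
        · rw [dif_pos hcond]
          rw [dif_pos ⟨by omega, by simp only [List.length_cons]; have := hcond.2.1; push_cast at this ⊢; omega,
                       hcond.2.2.1, by simpa [hts] using hcond.2.2.2⟩]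
          simp only [hts, List.getD_cons_succ, List.take_succ_cons, List.map_cons, List.sum_cons]
          congr 1
          push_cast
          ring
        · rw [dif_neg hcond, dif_neg]
          rintro ⟨a, b, c, d⟩
          exact hcond ⟨by omega, by simp only [List.length_cons] at b; omega, c,
                       by simpa [hts] using d⟩
      · rw [dif_neg (by rintro ⟨a, -⟩; omega), dif_neg (by rintro ⟨a, -⟩; omega)]

-- ===== VERDICT (by name: the statement is the Claim_ definition above) =====
theorem sign_rank_spec : Claim_equal_sign_rank := by
  intro level hx hy hz _ hpre
  unfold Spec_sign_rank sign_rank sign_rank_alt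
  unfold Pre_sign_rank at hpre
  obtain ⟨lines, hl⟩ : ∃ lines, PySem.List.pyGet? level hz = some lines := by
    cases h : PySem.List.pyGet? level hz with
    | none => rw [PySem.List.pyGet?_eq_none_iff] at h; exact absurd hpre h
    | some v => exact ⟨v, rfl⟩
  rw [hl]
  dsimp only
  rw [signRankOuter_spec lines 0 hx hy (-1)]
  simp only [sub_zero]
  by_cases hyr : 0 ≤ hy ∧ hy < (lines.length : Int)
  · rw [if_pos hyr]
    have hrow : PySem.List.pyGetD lines hy "" = lines.getD hy.toNat "" := by
      have := PySem.List.pyGetD_of_nonneg (xs := lines) (d := "") hyr.1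
      simpa [List.getD] using this
    by_cases hxr : 0 ≤ hx ∧ hx < (PySem.Str.len (PySem.List.pyGetD lines hy "") : Int)
    · rw [if_pos hxr]
      rw [dif_pos ?side]
      case side =>
        refine ⟨hyr.1, hyr.2, hxr.1, ?_⟩
        have := hxr.2
        rwa [hrow, PySem.Str.len_eq] at this
      congr 1
      have hslice : PySem.List.slice lines none (some hy) = lines.take hy.toNat := by
        have hcast : (some hy : Option Int) = some ((hy.toNat : Nat) : Int) := by
          congr 1; omega
        rw [hcast, PySem.List.slice_to_natCast]
      have hsum : ((PySem.List.slice lines none (some hy)).map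
          (fun line => (PySem.Str.count line "]" : Int))).sum
          = ((lines.take hy.toNat).map (fun l => (l.toList.count ']' : Int))).sum := by
        rw [hslice]
        congr 1
        exact List.map_congr_left (fun l _ => by rw [strCount_bracket])
      have hrowslice : (PySem.Str.slice (PySem.List.pyGetD lines hy "") none (some (hx + 1))).toList
          = (lines.getD hy.toNat "").toList.take (hx + 1).toNat := by
        rw [hrow]
        have hcast : (some (hx + 1) : Option Int) = some (((hx + 1).toNat : Nat) : Int) := by
          congr 1; omega
        rw [PySem.Str.toList_slice, hcast, PySem.Chars.slice_eq_listSlice,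
            PySem.List.slice_to_natCast]
      have hcnt : (PySem.Str.count (PySem.Str.slice (PySem.List.pyGetD lines hy "") none (some (hx + 1))) "]" : Int)
          = (((lines.getD hy.toNat "").toList.take (hx + 1).toNat).count ']' : Int) := by
        rw [strCount_bracket, hrowslice]
      rw [hsum, hcnt]
      push_cast
      ring
    · rw [if_neg hxr, dif_neg]
      rintro ⟨-, -, a, b⟩
      exact hxr ⟨a, by rw [hrow, PySem.Str.len_eq]; exact b⟩
  · rw [if_neg hyr, dif_neg (by rintro ⟨a, b, -⟩; exact hyr ⟨a, b⟩)]
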